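-- pv_equiv track=rewrite | github.com/obo-koki/tetris | game_manager/block_controller.py | get_peaks
-- ===== SOURCE A (Python) =====
-- def get_peaks(board, height, width):
--     start_height = height - 1
--     peaks = [0] * width
--     for x in range(width):
--         for y in range(start_height, 0, -1):
--             if board[(height - y) * width + x] != 0:
--                 peaks[x] = y
--                 break
--     return peaks
-- ===== SOURCE B (Python) =====
-- def get_peaks(board, height, width):
--     peaks = [0] * width
--     if width <= 0:
--         return peaks
--     for idx, v in enumerate(board):
--         r, x = divmod(idx, width)
--         if v != 0 and 1 <= r < height:
--             peaks[x] = max(peaks[x], height - r)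
--     return peaks
-- ===== Notes on version B (the rewrite author's own statement) =====
-- stated objective: alternative
-- what changed: Replaces the column-major nested loop with break (first nonzero cell scanning rows bottom-up per column) by a single flat enumerate pass over the board that keeps a running per-column maximum of height-row via divmod.
-- outside the precondition, e.g. on get_peaks([9, 9], 3, 1): A returns [2], B returns [2]
import Mathlib
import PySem

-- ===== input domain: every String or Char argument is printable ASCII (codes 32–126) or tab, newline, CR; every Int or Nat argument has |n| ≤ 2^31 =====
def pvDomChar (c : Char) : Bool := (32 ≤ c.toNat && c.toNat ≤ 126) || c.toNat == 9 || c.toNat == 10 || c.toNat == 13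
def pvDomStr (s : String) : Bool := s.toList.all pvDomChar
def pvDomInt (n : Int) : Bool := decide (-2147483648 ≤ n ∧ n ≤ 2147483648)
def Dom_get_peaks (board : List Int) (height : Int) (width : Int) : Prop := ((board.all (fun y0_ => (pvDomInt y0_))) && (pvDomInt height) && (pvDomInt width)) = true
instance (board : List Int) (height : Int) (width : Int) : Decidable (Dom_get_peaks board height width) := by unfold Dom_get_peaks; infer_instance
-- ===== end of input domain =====

-- B replaces A's column-major nested scan with break by one flat pass keeping a running
-- per-column maximum (objective: alternative decomposition, same asymptotic cost).

-- ===== PORT A =====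
-- inner loop 'for y in range(start_height, 0, -1): if board[...] != 0: peaks[x] = y; break'
-- (returns the y of the first hit; pyGetD is exact here: under Pre_ every visited index is in range,
-- so Python's board[...] never raises)
def aLoopY (board : List Int) (height : Int) (width : Int) (x : Int) : List Int → Option Int
  | [] => none
  | y :: ys =>
    if PySem.List.pyGetD board ((height - y) * width + x) 0 ≠ 0 then some y
    else aLoopY board height width x ys

-- body of the outer 'for x in range(width)' loop
def aStep (board : List Int) (height : Int) (width : Int) (peaks : List Int) (x : Int) : List Int :=
  match aLoopY board height width x (PySem.List.pyRange (height - 1) 0 (-1)) with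
  | some y => PySem.List.pySetD peaks x y
  | none => peaks

def get_peaks (board : List Int) (height : Int) (width : Int) : List Int :=
  (PySem.List.pyRange 0 width 1).foldl (aStep board height width)
    (List.replicate width.toNat 0)

-- ===== PORT B =====
-- body of 'for idx, v in enumerate(board)': r, x = divmod(idx, width); running max per column
def bStep (height : Int) (width : Int) (peaks : List Int) (iv : Int × Int) : List Int :=
  if iv.2 ≠ 0 ∧ 1 ≤ PySem.Int.floordiv iv.1 width ∧ PySem.Int.floordiv iv.1 width < height then
    PySem.List.pySetD peaks (PySem.Int.mod iv.1 width)
      (max (PySem.List.pyGetD peaks (PySem.Int.mod iv.1 width) 0)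
        (height - PySem.Int.floordiv iv.1 width))
  else peaks

def get_peaks_alt (board : List Int) (height : Int) (width : Int) : List Int :=
  if width ≤ 0 then List.replicate width.toNat 0   -- degenerate grid: divmod undefined / no columns
  else (PySem.List.enumerate board).foldl (bStep height width)
    (List.replicate width.toNat 0)

-- ===== PRECONDITION & SPEC =====
-- Pre_ excludes, for positive width, boards shorter than height*width: malformed grids, on which A
-- raises IndexError for any column whose cells are all zero up to the board's end (where A happens
-- to return on such a board, both programs agree anyway).
def Pre_get_peaks (board : List Int) (height : Int) (width : Int) : Prop :=
  width ≤ 0 ∨ (1 ≤ width ∧ height * width ≤ (board.length : Int))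
instance (board : List Int) (height : Int) (width : Int) : Decidable (Pre_get_peaks board height width) := by unfold Pre_get_peaks; infer_instance

def pvWitness_get_peaks : List Int × Int × Int := ([0, 0, 1, 0, 5, 0], 3, 2)

def Spec_get_peaks (board : List Int) (height : Int) (width : Int) (out : List Int) : Prop := out = get_peaks_alt board height width
instance (board : List Int) (height : Int) (width : Int) (out : List Int) : Decidable (Spec_get_peaks board height width out) := by unfold Spec_get_peaks; infer_instance

-- ===== CLAIM (what is proved, stated in full; the proofs are below) =====
def Claim_equal_get_peaks : Prop := ∀ (board : List Int) (height : Int) (width : Int), Dom_get_peaks board height width → Pre_get_peaks board height width → Spec_get_peaks board height width (get_peaks board height width)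

-- ===== LEMMAS AND PROOFS =====

-- the cell of row r, column x, and the common per-column value both sides compute
def pvCell (board : List Int) (width : Int) (r : Int) (x : Int) : Int :=
  PySem.List.pyGetD board (r * width + x) 0

def pvColVal (board : List Int) (height : Int) (width : Int) (x : Int) : Int :=
  ((PySem.List.pyRange 1 height 1).filter
      (fun r => decide (pvCell board width r x ≠ 0))).foldl
    (fun a r => max a (height - r)) 0

-- ---- generic facts ----

lemma pv_rc_id : RightCommutative (fun (a : Int) (y : Int) => max a y) :=
  ⟨fun b x y => max_right_comm b x y⟩

lemma pv_rc_sub (height width : Int) :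
    RightCommutative (fun (a : Int) (i : Int) =>
      max a (height - PySem.Int.floordiv i width)) :=
  ⟨fun b _ _ => max_right_comm b _ _⟩

lemma pv_set_getD_ne (l : List Int) (n m : Nat) (v : Int) (h : n ≠ m) :
    (l.set n v).getD m 0 = l.getD m 0 := by
  simp [List.getD, List.getElem?_set_ne h]

lemma pv_set_getD_eq (l : List Int) (n : Nat) (v : Int) (h : n < l.length) :
    (l.set n v).getD n 0 = v := by
  simp [List.getD, h]

-- ---- A side ----

lemma aStep_len (board : List Int) (height width : Int) (pk : List Int) (x : Int) :
    (aStep board height width pk x).length = pk.length := by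
  unfold aStep
  cases aLoopY board height width x (PySem.List.pyRange (height - 1) 0 (-1)) with
  | none => rfl
  | some y => simp [PySem.List.length_pySetD]

lemma foldA_len (board : List Int) (height width : Int) :
    ∀ (l : List Int) (pk : List Int),
      (l.foldl (aStep board height width) pk).length = pk.length := by
  intro l
  induction l with
  | nil => intro pk; rfl
  | cons a t ih => intro pk; simp only [List.foldl_cons]; rw [ih, aStep_len]

lemma get_peaks_length (board : List Int) (height width : Int) :
    (get_peaks board height width).length = width.toNat := by
  unfold get_peaks; rw [foldA_len, List.length_replicate]

lemma foldA_getD_not_mem (board : List Int) (height width : Int) :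
    ∀ (l : List Int) (pk : List Int) (j : Nat),
      (∀ x ∈ l, 0 ≤ x) → (j : Int) ∉ l →
      (l.foldl (aStep board height width) pk).getD j 0 = pk.getD j 0 := by
  intro l
  induction l with
  | nil => intro pk j _ _; rfl
  | cons a t ih =>
    intro pk j hpos hj
    simp only [List.foldl_cons]
    rw [ih _ _ (fun x hx => hpos x (List.mem_cons_of_mem _ hx))
        (fun h => hj (List.mem_cons_of_mem _ h))]
    have ha : 0 ≤ a := hpos a List.mem_cons_self
    have hne : a.toNat ≠ j := by
      intro h
      exact hj (by simp only [List.mem_cons]; left; omega)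
    unfold aStep
    cases aLoopY board height width a (PySem.List.pyRange (height - 1) 0 (-1)) with
    | none => rfl
    | some y =>
      dsimp only
      rw [PySem.List.pySetD_of_nonneg _ _ ha, pv_set_getD_ne _ _ _ _ hne]

lemma foldA_getD_mem (board : List Int) (height width : Int) :
    ∀ (l : List Int) (pk : List Int) (j : Nat),
      l.Nodup → (∀ x ∈ l, 0 ≤ x ∧ x.toNat < pk.length) → (j : Int) ∈ l →
      (l.foldl (aStep board height width) pk).getD j 0 =
        ((aLoopY board height width (j : Int)
            (PySem.List.pyRange (height - 1) 0 (-1))).map id).getD (pk.getD j 0) := by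
  intro l
  induction l with
  | nil => intro pk j _ _ hj; exact absurd hj (List.not_mem_nil)
  | cons a t ih =>
    intro pk j hnd hb hj
    simp only [List.foldl_cons]
    by_cases haj : a = (j : Int)
    · subst haj
      have hnotin : (↑j : Int) ∉ t := (List.nodup_cons.mp hnd).1
      rw [foldA_getD_not_mem board height width t _ j
          (fun x hx => (hb x (List.mem_cons_of_mem _ hx)).1) hnotin]
      have hlen : j < pk.length := by
        have := (hb _ List.mem_cons_self).2; omega
      unfold aStep
      cases aLoopY board height width (↑j : Int) (PySem.List.pyRange (height - 1) 0 (-1)) with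
      | none => rfl
      | some y =>
        dsimp only
        rw [PySem.List.pySetD_of_nonneg _ _ (by omega : (0:Int) ≤ (j:Int))]
        simp only [Option.map_some, Option.getD_some, id]
        rw [show ((j:Int)).toNat = j from by omega, pv_set_getD_eq _ _ _ hlen]
    · have hjt : (j : Int) ∈ t := by
        rcases List.mem_cons.mp hj with h | h
        · exact absurd h.symm haj
        · exact h
      have hlen : (aStep board height width pk a).length = pk.length := aStep_len _ _ _ _ _
      rw [ih _ _ (List.nodup_cons.mp hnd).2
          (fun x hx => by rw [hlen]; exact hb x (List.mem_cons_of_mem _ hx)) hjt]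
      have ha := hb a List.mem_cons_self
      have : (aStep board height width pk a).getD j 0 = pk.getD j 0 := by
        unfold aStep
        cases aLoopY board height width a (PySem.List.pyRange (height - 1) 0 (-1)) with
        | none => rfl
        | some y =>
          dsimp only
          rw [PySem.List.pySetD_of_nonneg _ _ ha.1,
            pv_set_getD_ne _ _ _ _ (by intro h; apply haj; omega)]
      rw [this]

lemma A_entry (board : List Int) (height width : Int) (hw : 1 ≤ width) (j : Nat)
    (hj : j < width.toNat) :
    (get_peaks board height width).getD j 0 =
      ((aLoopY board height width (j : Int)
          (PySem.List.pyRange (height - 1) 0 (-1))).map id).getD 0 := by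
  unfold get_peaks
  rw [foldA_getD_mem board height width _ _ j (PySem.List.nodup_pyRange_one 0 width)
      (fun x hx => by
        have := (PySem.List.mem_pyRange_one).mp hx
        constructor
        · omega
        · rw [List.length_replicate]; omega)
      ((PySem.List.mem_pyRange_one).mpr (by omega))]
  congr 1
  simp [List.getD, hj]

-- first hit of a strictly decreasing positive scan = running max over all hits
lemma pv_maxfold_stay (p : Int → Prop) [DecidablePred p] :
    ∀ (t : List Int) (a : Int), (∀ y ∈ t, y ≤ a) →
      t.foldl (fun acc y => if p y then max acc y else acc) a = a := by
  intro t
  induction t with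
  | nil => intro a _; rfl
  | cons y ys ih =>
    intro a hle
    simp only [List.foldl_cons]
    have hy : y ≤ a := hle y List.mem_cons_self
    have : (if p y then max a y else a) = a := by
      split_ifs with h
      · exact max_eq_left hy
      · rfl
    rw [this]; exact ih a (fun z hz => hle z (List.mem_cons_of_mem _ hz))

lemma aLoopY_maxfold (board : List Int) (height width x : Int) :
    ∀ (ys : List Int), ys.Pairwise (· > ·) → (∀ y ∈ ys, 1 ≤ y) →
      ((aLoopY board height width x ys).map id).getD 0 =
        ys.foldl (fun a y =>
          if PySem.List.pyGetD board ((height - y) * width + x) 0 ≠ 0 then max a y else a) 0 := by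
  intro ys
  induction ys with
  | nil => intro _ _; rfl
  | cons y t ih =>
    intro hpw hpos
    simp only [List.foldl_cons]
    unfold aLoopY
    split_ifs with h
    · simp only [Option.map_some, Option.getD_some, id]
      have h0 : max (0:Int) y = y := max_eq_right (by have := hpos y List.mem_cons_self; omega)
      rw [h0]
      exact (pv_maxfold_stay _ t y (fun z hz => le_of_lt ((List.pairwise_cons.mp hpw).1 z hz))).symm
    · exact ih (List.pairwise_cons.mp hpw).2 (fun z hz => hpos z (List.mem_cons_of_mem _ hz))

lemma A_scalar (board : List Int) (height width : Int) (j : Nat) :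
    ((aLoopY board height width (j : Int)
        (PySem.List.pyRange (height - 1) 0 (-1))).map id).getD 0 =
      pvColVal board height width (j : Int) := by
  have hys : PySem.List.pyRange (height - 1) 0 (-1) = (PySem.List.pyRange 1 height 1).reverse := by
    rw [PySem.List.pyRange_neg_one_eq_reverse]; norm_num
  rw [aLoopY_maxfold board height width (j : Int) _
      (by
        rw [hys, List.pairwise_reverse]
        exact List.Pairwise.imp (fun h => h) (PySem.List.pairwise_lt_pyRange_one 1 height))
      (by
        intro y hy
        have := (PySem.List.mem_pyRange_neg_one).mp hy
        omega)]
  rw [PySem.List.foldl_ite_eq_foldl_filter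
      (fun y => PySem.List.pyGetD board ((height - y) * width + (j : Int)) 0 ≠ 0)
      (fun a y => max a y)]
  rw [hys, List.filter_reverse]
  rw [List.Perm.foldl_eq (rcomm := pv_rc_id) (List.reverse_perm _) 0]
  have hperm : ((PySem.List.pyRange 1 height 1).filter
        (fun y => decide (PySem.List.pyGetD board ((height - y) * width + (j : Int)) 0 ≠ 0))).Perm
      (((PySem.List.pyRange 1 height 1).filter
          (fun r => decide (pvCell board width r (j : Int) ≠ 0))).map (fun r => height - r)) := by
    rw [List.perm_ext_iff_of_nodup
        ((PySem.List.nodup_pyRange_one 1 height).filter _)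
        (((PySem.List.nodup_pyRange_one 1 height).filter _).map
          (fun a b hab => by omega))]
    intro y
    simp only [List.mem_filter, List.mem_map, PySem.List.mem_pyRange_one, decide_eq_true_eq,
      pvCell]
    constructor
    · rintro ⟨⟨h1, h2⟩, h3⟩
      exact ⟨height - y, ⟨⟨by omega, by omega⟩, h3⟩, by omega⟩
    · rintro ⟨r, ⟨⟨h1, h2⟩, h3⟩, h4⟩
      have hr : height - y = r := by omega
      refine ⟨⟨by omega, by omega⟩, ?_⟩
      rw [hr]; exact h3
  rw [hperm.foldl_eq (rcomm := pv_rc_id) 0]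
  rw [List.foldl_map]
  rfl

-- ---- B side ----

lemma bStep_len (height width : Int) (pk : List Int) (iv : Int × Int) :
    (bStep height width pk iv).length = pk.length := by
  unfold bStep
  split_ifs with h
  · simp [PySem.List.length_pySetD]
  · rfl

lemma foldB_len (height width : Int) :
    ∀ (l : List (Int × Int)) (pk : List Int),
      (l.foldl (bStep height width) pk).length = pk.length := by
  intro l
  induction l with
  | nil => intro pk; rfl
  | cons a t ih => intro pk; simp only [List.foldl_cons]; rw [ih, bStep_len]

lemma get_peaks_alt_length (board : List Int) (height width : Int) :
    (get_peaks_alt board height width).length = width.toNat := by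
  unfold get_peaks_alt
  split_ifs with h
  · rw [List.length_replicate]
  · rw [foldB_len, List.length_replicate]

lemma foldB_getD (height width : Int) (hw : 0 < width) :
    ∀ (l : List (Int × Int)) (pk : List Int), pk.length = width.toNat →
      ∀ (j : Nat), j < width.toNat →
      (l.foldl (bStep height width) pk).getD j 0 =
        l.foldl (fun a iv =>
          if iv.2 ≠ 0 ∧ 1 ≤ PySem.Int.floordiv iv.1 width ∧ PySem.Int.floordiv iv.1 width < height
              ∧ PySem.Int.mod iv.1 width = (j : Int)
          then max a (height - PySem.Int.floordiv iv.1 width) else a) (pk.getD j 0) := by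
  intro l
  induction l with
  | nil => intro pk _ j _; rfl
  | cons iv t ih =>
    intro pk hpk j hj
    simp only [List.foldl_cons]
    by_cases hg : iv.2 ≠ 0 ∧ 1 ≤ PySem.Int.floordiv iv.1 width ∧ PySem.Int.floordiv iv.1 width < height
    · have hm0 : 0 ≤ PySem.Int.mod iv.1 width := PySem.Int.mod_nonneg _ hw
      have hmw : PySem.Int.mod iv.1 width < width := PySem.Int.mod_lt _ hw
      obtain ⟨n, hn⟩ : ∃ n : Nat, PySem.Int.mod iv.1 width = (n : Int) :=
        ⟨(PySem.Int.mod iv.1 width).toNat, by omega⟩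
      have hnlen : n < pk.length := by omega
      have hbs : bStep height width pk iv =
          pk.set n (max (pk.getD n 0) (height - PySem.Int.floordiv iv.1 width)) := by
        unfold bStep
        rw [if_pos hg, hn]
        simp [PySem.List.pySetD_natCast, PySem.List.pyGetD_natCast]
      by_cases hmj : n = j
      · subst hmj
        rw [if_pos ⟨hg.1, hg.2.1, hg.2.2, hn⟩]
        rw [hbs, ih _ (by rw [List.length_set]; exact hpk) _ hj,
          pv_set_getD_eq _ _ _ hnlen]
      · rw [if_neg (by rintro ⟨_, _, _, h⟩; apply hmj; omega)]
        rw [hbs, ih _ (by rw [List.length_set]; exact hpk) _ hj,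
          pv_set_getD_ne _ _ _ _ hmj]
    · rw [if_neg (by rintro ⟨h1, h2, h3, _⟩; exact hg ⟨h1, h2, h3⟩)]
      have hbs : bStep height width pk iv = pk := by unfold bStep; rw [if_neg hg]
      rw [hbs, ih _ hpk j hj]

lemma B_entry (board : List Int) (height width : Int) (hw : 0 < width) (j : Nat)
    (hj : j < width.toNat) :
    (get_peaks_alt board height width).getD j 0 =
      (PySem.List.enumerate board).foldl (fun a iv =>
        if iv.2 ≠ 0 ∧ 1 ≤ PySem.Int.floordiv iv.1 width ∧ PySem.Int.floordiv iv.1 width < height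
            ∧ PySem.Int.mod iv.1 width = (j : Int)
        then max a (height - PySem.Int.floordiv iv.1 width) else a) 0 := by
  unfold get_peaks_alt
  rw [if_neg (by omega : ¬ width ≤ 0)]
  rw [foldB_getD height width hw _ _ (List.length_replicate) j hj]
  congr 1
  simp [List.getD, hj]

lemma B_scalar (board : List Int) (height width : Int) (hw : 0 < width)
    (hlen : height * width ≤ (board.length : Int)) (j : Nat) (hj : j < width.toNat) :
    (PySem.List.enumerate board).foldl (fun a iv =>
        if iv.2 ≠ 0 ∧ 1 ≤ PySem.Int.floordiv iv.1 width ∧ PySem.Int.floordiv iv.1 width < height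
            ∧ PySem.Int.mod iv.1 width = (j : Int)
        then max a (height - PySem.Int.floordiv iv.1 width) else a) 0 =
      pvColVal board height width (j : Int) := by
  have hj0 : (0 : Int) ≤ (j : Int) := by omega
  have hjw : (j : Int) < width := by omega
  have hfd : ∀ r : Int, PySem.Int.floordiv (r * width + (j : Int)) width = r := by
    intro r
    rw [PySem.Int.floordiv_eq_iff_of_pos hw]
    constructor
    · linarith
    · have h1 : (r + 1) * width = r * width + width := by ring
      rw [h1]; linarith
  have hmod : ∀ r : Int, PySem.Int.mod (r * width + (j : Int)) width = (j : Int) := by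
    intro r
    have h := PySem.Int.floordiv_mul_add_mod (r * width + (j : Int)) width
    rw [hfd r] at h; linarith
  rw [PySem.List.enumerate_eq_map_pyRange board 0, List.foldl_map]
  dsimp only
  rw [PySem.List.foldl_ite_eq_foldl_filter
      (fun i => PySem.List.pyGetD board i 0 ≠ 0 ∧ 1 ≤ PySem.Int.floordiv i width ∧
        PySem.Int.floordiv i width < height ∧ PySem.Int.mod i width = (j : Int))
      (fun a i => max a (height - PySem.Int.floordiv i width))]
  have hperm : ((PySem.List.pyRange 0 (PySem.List.len board) 1).filter
        (fun i => decide (PySem.List.pyGetD board i 0 ≠ 0 ∧ 1 ≤ PySem.Int.floordiv i width ∧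
          PySem.Int.floordiv i width < height ∧ PySem.Int.mod i width = (j : Int)))).Perm
      (((PySem.List.pyRange 1 height 1).filter
          (fun r => decide (pvCell board width r (j : Int) ≠ 0))).map
        (fun r => r * width + (j : Int))) := by
    rw [List.perm_ext_iff_of_nodup
        ((PySem.List.nodup_pyRange_one 0 (PySem.List.len board)).filter _)
        (((PySem.List.nodup_pyRange_one 1 height).filter _).map
          (fun a b hab => by
            have h2 : a * width = b * width := by linarith
            exact mul_right_cancel₀ (by omega) h2))]
    intro i
    simp only [List.mem_filter, List.mem_map, PySem.List.mem_pyRange_one, decide_eq_true_eq,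
      pvCell, PySem.List.len_eq]
    constructor
    · rintro ⟨⟨h0, h1⟩, h2, h3, h4, h5⟩
      have hi : PySem.Int.floordiv i width * width + (j : Int) = i := by
        have h := PySem.Int.floordiv_mul_add_mod i width
        rw [h5] at h; linarith
      refine ⟨PySem.Int.floordiv i width, ⟨⟨h3, h4⟩, ?_⟩, hi⟩
      rw [hi]; exact h2
    · rintro ⟨r, ⟨⟨h1, h2⟩, h3⟩, rfl⟩
      have hwle : 1 * width ≤ r * width := mul_le_mul_of_nonneg_right h1 (le_of_lt hw)
      have hup : r * width ≤ (height - 1) * width :=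
        mul_le_mul_of_nonneg_right (by omega) (le_of_lt hw)
      have hhw : (height - 1) * width = height * width - width := by ring
      refine ⟨⟨by linarith, by linarith⟩, h3, ?_, ?_, hmod r⟩
      · rw [hfd r]; exact h1
      · rw [hfd r]; exact h2
  rw [hperm.foldl_eq (rcomm := pv_rc_sub height width) 0]
  rw [List.foldl_map]
  simp only [hfd]
  rfl

lemma A_len_zero (board : List Int) (height width : Int) (h : width.toNat = 0) :
    get_peaks board height width = [] := by
  have hl := get_peaks_length board height width
  rw [h] at hl
  exact List.eq_nil_of_length_eq_zero hl

lemma B_len_zero (board : List Int) (height width : Int) (h : width.toNat = 0) :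
    get_peaks_alt board height width = [] := by
  have hl := get_peaks_alt_length board height width
  rw [h] at hl
  exact List.eq_nil_of_length_eq_zero hl

-- ===== VERDICT (by name: the statement is the Claim_ definition above) =====
theorem get_peaks_spec : Claim_equal_get_peaks := by
  intro board height width _ hpre
  unfold Spec_get_peaks
  rcases hpre with hle | ⟨hw, hlen⟩
  · rw [A_len_zero board height width (by omega), B_len_zero board height width (by omega)]
  apply List.ext_getElem
  · rw [get_peaks_length, get_peaks_alt_length]
  · intro i h1 h2
    have hi : i < width.toNat := by rw [get_peaks_length] at h1; exact h1
    have e1 : (get_peaks board height width)[i] = (get_peaks board height width).getD i 0 :=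
      (List.getD_eq_getElem _ _ h1).symm
    have e2 : (get_peaks_alt board height width)[i] = (get_peaks_alt board height width).getD i 0 :=
      (List.getD_eq_getElem _ _ h2).symm
    rw [e1, e2]
    rw [A_entry board height width hw i hi]
    rw [A_scalar board height width i]
    rw [B_entry board height width (by omega) i hi]
    rw [B_scalar board height width (by omega) hlen i hi]
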